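-- pv_equiv track=rewrite | github.com/3am-r/pico-morti | apps/fidget_core.py | detect_circle
-- ===== SOURCE A (Python) =====
-- def detect_circle(history):
--     if len(history) < 8:
--         return False
--
--     directions = []
--     for event in history[-8:]:
--         if event["joystick"]["up"]:
--             directions.append("u")
--         elif event["joystick"]["right"]:
--             directions.append("r")
--         elif event["joystick"]["down"]:
--             directions.append("d")
--         elif event["joystick"]["left"]:
--             directions.append("l")
--
--     pattern = "".join(directions)
--     return "urdl" in pattern or "rdlu" in pattern or "dlur" in pattern or "lurd" in pattern
-- ===== SOURCE B (Python) =====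
-- _SUCC = {"u": "r", "r": "d", "d": "l", "l": "u"}
--
--
-- def _direction(event):
--     js = event["joystick"]
--     if js["up"]:
--         return "u"
--     if js["right"]:
--         return "r"
--     if js["down"]:
--         return "d"
--     if js["left"]:
--         return "l"
--     return None
--
--
-- def detect_circle(history):
--     if len(history) < 8:
--         return False
--     prev = None
--     run = 0
--     for event in history[-8:]:
--         d = _direction(event)
--         if d is None:
--             continue  # inactive events contribute nothing; the run continues across them
--         if prev is not None and _SUCC[prev] == d:
--             run += 1
--         else:
--             run = 1
--         if run >= 4:
--             return True
--         prev = d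
--     return False
-- ===== Notes on version B (the rewrite author's own statement) =====
-- stated objective: alternative
-- what changed: B replaces building the direction string and testing the four rotations of 'urdl' as substrings by a single pass over the last 8 events that keeps a cyclic-successor run-length counter (runs continue across inactive events, exactly as the join drops them) and returns True as soon as the run reaches 4.
import Mathlib
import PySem

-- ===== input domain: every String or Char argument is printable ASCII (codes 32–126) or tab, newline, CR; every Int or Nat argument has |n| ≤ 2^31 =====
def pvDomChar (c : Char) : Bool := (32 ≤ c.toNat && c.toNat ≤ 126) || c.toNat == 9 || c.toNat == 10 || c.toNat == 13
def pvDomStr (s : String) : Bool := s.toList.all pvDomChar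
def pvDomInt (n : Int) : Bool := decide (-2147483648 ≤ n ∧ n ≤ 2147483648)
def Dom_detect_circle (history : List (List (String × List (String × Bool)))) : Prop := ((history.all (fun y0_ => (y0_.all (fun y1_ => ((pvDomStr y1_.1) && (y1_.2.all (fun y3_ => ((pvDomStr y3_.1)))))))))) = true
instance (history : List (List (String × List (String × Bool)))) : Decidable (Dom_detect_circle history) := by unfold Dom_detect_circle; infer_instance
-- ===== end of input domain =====

-- B replaces the join-into-a-string plus four rotation-substring tests by a single scan with a
-- cyclic-successor run counter and early exit (objective: alternative decomposition, same cost).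

-- ===== PORT A =====
-- Loop body of A's 'for event in history[-8:]' (dict lookups via PySem.Dict.get?; the .getD
-- defaults stand for Python's KeyError and are never reached inside Pre_detect_circle).
def aStep (directions : List Char) (event : List (String × List (String × Bool))) : List Char :=
  let js := PySem.Dict.mk ((PySem.Dict.get? (PySem.Dict.mk event) "joystick").getD [])
  if (PySem.Dict.get? js "up").getD false then directions ++ ['u']
  else if (PySem.Dict.get? js "right").getD false then directions ++ ['r']
  else if (PySem.Dict.get? js "down").getD false then directions ++ ['d']
  else if (PySem.Dict.get? js "left").getD false then directions ++ ['l']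
  else directions

def detect_circle (history : List (List (String × List (String × Bool)))) : Bool :=
  if history.length < 8 then false
  else
    let directions := (PySem.List.slice history (some (-8)) none).foldl aStep []
    -- pattern = "".join(directions): the directions are single chars, so the join is the char list
    let pattern := PySem.Chars.join [] (directions.map ([·]))
    PySem.Chars.isIn ['u','r','d','l'] pattern || PySem.Chars.isIn ['r','d','l','u'] pattern ||
      PySem.Chars.isIn ['d','l','u','r'] pattern || PySem.Chars.isIn ['l','u','r','d'] pattern

-- ===== PORT B =====
-- _SUCC lookup; its argument is always one of 'urdl' in B, so the final else is never a wrong value.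
def succChar (c : Char) : Char :=
  if c == 'u' then 'r' else if c == 'r' then 'd' else if c == 'd' then 'l' else 'u'

-- B's _direction helper
def dirOf (event : List (String × List (String × Bool))) : Option Char :=
  let js := PySem.Dict.mk ((PySem.Dict.get? (PySem.Dict.mk event) "joystick").getD [])
  if (PySem.Dict.get? js "up").getD false then some 'u'
  else if (PySem.Dict.get? js "right").getD false then some 'r'
  else if (PySem.Dict.get? js "down").getD false then some 'd'
  else if (PySem.Dict.get? js "left").getD false then some 'l'
  else none

-- B's loop body; state = (returned-True-already, prev, run)
def bStep (st : Bool × Option Char × Int) (event : List (String × List (String × Bool))) :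
    Bool × Option Char × Int :=
  if st.1 then st
  else
    match dirOf event with
    | none => st
    | some d =>
      let run : Int := match st.2.1 with
        | some p => if succChar p == d then st.2.2 + 1 else 1
        | none => 1
      if 4 ≤ run then (true, some d, run) else (false, some d, run)

def detect_circle_alt (history : List (List (String × List (String × Bool)))) : Bool :=
  if history.length < 8 then false
  else ((PySem.List.slice history (some (-8)) none).foldl bStep (false, none, 0)).1

-- ===== PRECONDITION & SPEC =====
-- Python A (and B alike) raises KeyError when an event among the last 8 lacks the "joystick" key or
-- its joystick dict lacks a direction key it reaches (short-circuit: keys after the first true one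
-- are never read); Pre_ is exactly the inputs where A returns normally.
def pvJsOk (js : List (String × Bool)) : Bool :=
  let js := PySem.Dict.mk js
  match PySem.Dict.get? js "up" with
  | none => false
  | some true => true
  | some false =>
    match PySem.Dict.get? js "right" with
    | none => false
    | some true => true
    | some false =>
      match PySem.Dict.get? js "down" with
      | none => false
      | some true => true
      | some false => (PySem.Dict.get? js "left").isSome

def pvEventOk (event : List (String × List (String × Bool))) : Bool :=
  match PySem.Dict.get? (PySem.Dict.mk event) "joystick" with
  | none => false
  | some js => pvJsOk js

def Pre_detect_circle (history : List (List (String × List (String × Bool)))) : Prop :=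
  8 ≤ history.length → ∀ event ∈ history.drop (history.length - 8), pvEventOk event = true

instance (history : List (List (String × List (String × Bool)))) : Decidable (Pre_detect_circle history) := by
  unfold Pre_detect_circle; infer_instance

def pvWitness_detect_circle : (List (List (String × List (String × Bool)))) :=
  List.replicate 8 [("joystick", [("up", true), ("right", false), ("down", false), ("left", false)])]

def Spec_detect_circle (history : List (List (String × List (String × Bool)))) (out : Bool) : Prop := out = detect_circle_alt history
instance (history : List (List (String × List (String × Bool)))) (out : Bool) : Decidable (Spec_detect_circle history out) := by unfold Spec_detect_circle; infer_instance

-- ===== CLAIM (what is proved, stated in full; the proofs are below) =====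
def Claim_equal_detect_circle : Prop := ∀ (history : List (List (String × List (String × Bool)))), Dom_detect_circle history → Pre_detect_circle history → Spec_detect_circle history (detect_circle history)

-- ===== LEMMAS AND PROOFS =====

-- scan step on the extracted direction characters
def sStep (st : Bool × Option Char × Int) (d : Char) : Bool × Option Char × Int :=
  if st.1 then st
  else
    let run : Int := match st.2.1 with
      | some p => if succChar p == d then st.2.2 + 1 else 1
      | none => 1
    if 4 ≤ run then (true, some d, run) else (false, some d, run)

-- run length of the maximal successor-chain suffix, computed on the reversed list
def runR : List Char → Nat
  | [] => 0
  | [_] => 1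
  | d :: p :: rest => if succChar p == d then runR (p :: rest) + 1 else 1

def crun (ds : List Char) : Nat := runR ds.reverse

-- A's final rotation-substring test as a function of the direction chars
def isRot4 (ds : List Char) : Bool :=
  PySem.Chars.isIn ['u','r','d','l'] ds || PySem.Chars.isIn ['r','d','l','u'] ds ||
    PySem.Chars.isIn ['d','l','u','r'] ds || PySem.Chars.isIn ['l','u','r','d'] ds

theorem aStep_eq (acc : List Char) (e : List (String × List (String × Bool))) :
    aStep acc e = acc ++ (dirOf e).toList := by
  simp only [aStep, dirOf]
  split_ifs <;> simp

theorem foldl_aStep (L : List (List (String × List (String × Bool)))) (acc : List Char) :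
    L.foldl aStep acc = acc ++ L.filterMap dirOf := by
  induction L generalizing acc with
  | nil => simp
  | cons e L ih =>
    rw [List.foldl_cons, ih, aStep_eq, List.filterMap_cons]
    cases dirOf e <;> simp

theorem bStep_eq (st : Bool × Option Char × Int) (e : List (String × List (String × Bool))) :
    bStep st e = (dirOf e).elim st (sStep st) := by
  cases h : dirOf e <;> by_cases hf : st.1 <;> simp [bStep, sStep, h, hf]

theorem foldl_bStep (L : List (List (String × List (String × Bool)))) (st : Bool × Option Char × Int) :
    L.foldl bStep st = (L.filterMap dirOf).foldl sStep st := by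
  induction L generalizing st with
  | nil => rfl
  | cons e L ih =>
    rw [List.foldl_cons, List.filterMap_cons, bStep_eq]
    cases dirOf e <;> simp [ih]

theorem dirOf_mem (e : List (String × List (String × Bool))) (c : Char) (h : dirOf e = some c) :
    c ∈ (['u','r','d','l'] : List Char) := by
  simp only [dirOf] at h
  split_ifs at h
  all_goals injection h with h; subst h; decide

theorem runR_pos (z : Char) (rest : List Char) : 1 ≤ runR (z :: rest) := by
  cases rest with
  | nil => simp [runR]
  | cons p t => rw [runR]; split_ifs <;> omega

theorem crun_append (ds : List Char) (d : Char) :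
    crun (ds ++ [d]) =
      match ds.getLast? with
      | none => 1
      | some p => if succChar p == d then crun ds + 1 else 1 := by
  unfold crun
  rw [List.reverse_append]
  cases h : ds.reverse with
  | nil =>
    have hds : ds = [] := List.reverse_eq_nil_iff.mp h
    subst hds; simp [runR]
  | cons p rs =>
    have hl : ds.getLast? = some p := by
      rw [← List.head?_reverse, h]; rfl
    simp only [List.reverse_singleton, List.singleton_append, runR, hl]

theorem runR_ge4 (zs : List Char) (h : 4 ≤ runR zs) :
    ∃ z1 z2 z3 z4 rest, zs = z1 :: z2 :: z3 :: z4 :: rest ∧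
      succChar z2 = z1 ∧ succChar z3 = z2 ∧ succChar z4 = z3 := by
  match zs with
  | [] => simp [runR] at h
  | [z1] => simp [runR] at h
  | [z1, z2] => simp only [runR] at h; split_ifs at h <;> simp_all
  | [z1, z2, z3] =>
    simp only [runR] at h; split_ifs at h <;> simp_all
  | z1 :: z2 :: z3 :: z4 :: rest =>
    simp only [runR] at h
    split_ifs at h with h1 h2 h3
    · exact ⟨z1, z2, z3, z4, rest, rfl, by simpa using h1, by simpa using h2,
        by simpa using h3⟩
    all_goals omega

theorem runR_of_chain (z1 z2 z3 z4 : Char) (rest : List Char)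
    (h1 : succChar z2 = z1) (h2 : succChar z3 = z2) (h3 : succChar z4 = z3) :
    4 ≤ runR (z1 :: z2 :: z3 :: z4 :: rest) := by
  have h4 := runR_pos z4 rest
  have : runR (z1 :: z2 :: z3 :: z4 :: rest) = runR (z4 :: rest) + 1 + 1 + 1 := by
    simp only [runR, h1, h2, h3, BEq.rfl, if_true]
  omega

-- pat infix of xs ++ [d] is pat infix of xs or pat suffix of xs ++ [d]
theorem infix_append_singleton {pat xs : List Char} {d : Char} (h : pat <:+: xs ++ [d]) :
    pat <:+: xs ∨ pat <:+ xs ++ [d] := by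
  obtain ⟨s, t, hst⟩ := h
  rcases t.eq_nil_or_concat with rfl | ⟨t', a, rfl⟩
  · right
    exact ⟨s, by simpa using hst⟩
  · left
    have h2 : (s ++ pat ++ t') ++ [a] = xs ++ [d] := by
      simpa [List.concat_eq_append, List.append_assoc] using hst
    have := (List.append_inj' h2 rfl).1
    exact ⟨s, t', by simpa [List.append_assoc] using this⟩

theorem isRot4_of_crun (ds : List Char) (hal : ∀ c ∈ ds, c ∈ (['u','r','d','l'] : List Char))
    (h : 4 ≤ crun ds) : isRot4 ds = true := by
  obtain ⟨z1, z2, z3, z4, rest, hz, h1, h2, h3⟩ := runR_ge4 ds.reverse h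
  subst h1; subst h2; subst h3
  have hsuffix : [z4, succChar z4, succChar (succChar z4), succChar (succChar (succChar z4))]
      <:+ ds := by
    have hds : ds = rest.reverse ++
        [z4, succChar z4, succChar (succChar z4), succChar (succChar (succChar z4))] := by
      have := congrArg List.reverse hz
      simpa using this
    exact ⟨rest.reverse, hds.symm⟩
  have hz4 : z4 ∈ ds := hsuffix.subset (by simp)
  have hz4' := hal z4 hz4
  unfold isRot4
  simp only [Bool.or_eq_true, PySem.Chars.isIn_iff_infix]
  have hinf := hsuffix.isInfix
  fin_cases hz4' <;> simp [succChar] at hinf <;> tauto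

theorem crun_of_suffix (ds pat : List Char) (hs : pat <:+ ds)
    (hc : ∃ z1 z2 z3 z4, pat = [z1, z2, z3, z4] ∧ succChar z1 = z2 ∧ succChar z2 = z3 ∧
      succChar z3 = z4) : 4 ≤ crun ds := by
  obtain ⟨z1, z2, z3, z4, rfl, h1, h2, h3⟩ := hc
  obtain ⟨pre, rfl⟩ := hs
  unfold crun
  rw [List.reverse_append]
  have heq : ([z1, z2, z3, z4] : List Char).reverse ++ pre.reverse
      = z4 :: z3 :: z2 :: z1 :: pre.reverse := by simp
  rw [heq]
  exact runR_of_chain z4 z3 z2 z1 pre.reverse h3 h2 h1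

theorem crun_of_isRot4 (ds : List Char) (d : Char) (hnot : isRot4 ds = false)
    (h : isRot4 (ds ++ [d]) = true) : 4 ≤ crun (ds ++ [d]) := by
  unfold isRot4 at h hnot
  simp only [Bool.or_eq_true, PySem.Chars.isIn_iff_infix] at h
  simp only [Bool.or_eq_false_iff, PySem.Chars.isIn_eq_false_iff] at hnot
  obtain ⟨⟨⟨hn1, hn2⟩, hn3⟩, hn4⟩ := hnot
  have lift : ∀ pat : List Char,
      (∃ z1 z2 z3 z4, pat = [z1, z2, z3, z4] ∧ succChar z1 = z2 ∧ succChar z2 = z3 ∧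
        succChar z3 = z4) → ¬ pat <:+: ds → pat <:+: ds ++ [d] → 4 ≤ crun (ds ++ [d]) := by
    intro pat hc hn hi
    rcases infix_append_singleton hi with hx | hx
    · exact absurd hx hn
    · exact crun_of_suffix (ds ++ [d]) pat hx hc
  rcases h with ((h | h) | h) | h
  · exact lift _ ⟨'u','r','d','l', rfl, by decide, by decide, by decide⟩ hn1 h
  · exact lift _ ⟨'r','d','l','u', rfl, by decide, by decide, by decide⟩ hn2 h
  · exact lift _ ⟨'d','l','u','r', rfl, by decide, by decide, by decide⟩ hn3 h
  · exact lift _ ⟨'l','u','r','d', rfl, by decide, by decide, by decide⟩ hn4 h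

theorem isRot4_mono (ds : List Char) (d : Char) (h : isRot4 ds = true) :
    isRot4 (ds ++ [d]) = true := by
  unfold isRot4 at h ⊢
  simp only [Bool.or_eq_true, PySem.Chars.isIn_iff_infix] at h ⊢
  have ext : ∀ pat : List Char, pat <:+: ds → pat <:+: ds ++ [d] := fun pat hp =>
    hp.trans (List.prefix_append ds [d]).isInfix
  rcases h with ((h | h) | h) | h
  · exact Or.inl (Or.inl (Or.inl (ext _ h)))
  · exact Or.inl (Or.inl (Or.inr (ext _ h)))
  · exact Or.inl (Or.inr (ext _ h))
  · exact Or.inr (ext _ h)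

theorem scan_inv (ds : List Char) (hal : ∀ c ∈ ds, c ∈ (['u','r','d','l'] : List Char)) :
    (ds.foldl sStep (false, none, 0)).1 = isRot4 ds ∧
      ((ds.foldl sStep (false, none, 0)).1 = false →
        (ds.foldl sStep (false, none, 0)).2.1 = ds.getLast? ∧
        (ds.foldl sStep (false, none, 0)).2.2 = (crun ds : Int)) := by
  induction ds using List.reverseRecOn with
  | nil => constructor <;> simp [isRot4, crun, runR]; decide
  | append_singleton ds d ih =>
    have hal' : ∀ c ∈ ds, c ∈ (['u','r','d','l'] : List Char) := fun c hc =>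
      hal c (by simp [hc])
    obtain ⟨ih1, ih2⟩ := ih hal'
    rw [List.foldl_append, List.foldl_cons, List.foldl_nil]
    by_cases hf : (ds.foldl sStep (false, none, 0)).1
    · have hrot : isRot4 ds = true := by rw [← ih1]; exact hf
      have : sStep (ds.foldl sStep (false, none, 0)) d = ds.foldl sStep (false, none, 0) := by
        simp [sStep, hf]
      rw [this]
      constructor
      · rw [ih1, hrot, isRot4_mono ds d hrot]
      · intro hcon; rw [hf] at hcon; exact absurd hcon (by simp)
    · replace hf : (ds.foldl sStep (false, none, 0)).1 = false := by
        simpa using hf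
      have hrot : isRot4 ds = false := by rw [← ih1]; exact hf
      obtain ⟨hprev, hrun⟩ := ih2 hf
      have hrun_eq :
          (match (ds.foldl sStep (false, none, 0)).2.1 with
            | some p => if succChar p == d then (ds.foldl sStep (false, none, 0)).2.2 + 1
                        else (1 : Int)
            | none => (1 : Int)) = (crun (ds ++ [d]) : Int) := by
        rw [hprev, hrun, crun_append]
        cases ds.getLast? with
        | none => rfl
        | some p => by_cases hpd : (succChar p == d) = true <;> simp [hpd]
      have hrot_eq : isRot4 (ds ++ [d]) = decide (4 ≤ crun (ds ++ [d])) := by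
        by_cases hc : 4 ≤ crun (ds ++ [d])
        · rw [isRot4_of_crun (ds ++ [d]) hal hc, decide_eq_true hc]
        · have : isRot4 (ds ++ [d]) = false := by
            by_contra hx
            exact hc (crun_of_isRot4 ds d hrot (by simpa using hx))
          rw [this, decide_eq_false hc]
      rw [sStep, if_neg (by simp [hf]), hrun_eq]
      by_cases hc : (4 : Int) ≤ (crun (ds ++ [d]) : Int)
      · rw [if_pos hc]
        constructor
        · have : (4 : Nat) ≤ crun (ds ++ [d]) := by exact_mod_cast hc
          simp [hrot_eq, this]
        · intro hcon; exact absurd hcon (by simp)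
      · rw [if_neg hc]
        have hc' : ¬ (4 : Nat) ≤ crun (ds ++ [d]) := by exact_mod_cast hc
        refine ⟨by simp [hrot_eq, hc'], fun _ => ⟨?_, rfl⟩⟩
        simp

theorem detect_circle_spec : Claim_equal_detect_circle := by
  intro history _ _
  unfold Spec_detect_circle detect_circle detect_circle_alt
  by_cases hlen : history.length < 8
  · simp [hlen]
  · rw [if_neg hlen, if_neg hlen]
    set L := PySem.List.slice history (some (-8)) none with hL
    have hdirs : L.foldl aStep [] = L.filterMap dirOf := by
      simpa using foldl_aStep L []
    have hal : ∀ c ∈ L.filterMap dirOf, c ∈ (['u','r','d','l'] : List Char) := by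
      intro c hc
      rw [List.mem_filterMap] at hc
      obtain ⟨e, _, he⟩ := hc
      exact dirOf_mem e c he
    rw [foldl_bStep, (scan_inv (L.filterMap dirOf) hal).1]
    simp only [hdirs, PySem.Chars.join_nil_singletons]
    rfl
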